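-- pv_equiv track=rewrite | github.com/Raxyyydev25/Rewarify_Sustainable-development-platfrom | Rewearify-main/ai_service/services/matching.py | _is_similar_category
-- ===== SOURCE A (Python) =====
-- def _is_similar_category(cat1, cat2):
--     """Check if categories are similar"""
--     similar_groups = [
--         {'outerwear', 'seasonal'},
--         {'formal', 'professional'},
--         {'casual', 'everyday'},
--         {'children', 'kids'},
--         {'household', 'linens'}
--     ]
--
--     for group in similar_groups:
--         if cat1 in group and cat2 in group:
--             return True
--     return False
-- ===== SOURCE B (Python) =====
-- _GROUP_ID = {
--     'outerwear': 0, 'seasonal': 0,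
--     'formal': 1, 'professional': 1,
--     'casual': 2, 'everyday': 2,
--     'children': 3, 'kids': 3,
--     'household': 4, 'linens': 4,
-- }
--
-- def _is_similar_category(cat1, cat2):
--     """Check if categories are similar"""
--     g = _GROUP_ID.get(cat1)
--     return g is not None and g == _GROUP_ID.get(cat2)
-- ===== Notes on version B (the rewrite author's own statement) =====
-- stated objective: idiomatic
-- what changed: Replaces the loop over a list of sets with a precomputed category-to-group-id dict and a single pair of lookups (no loop, no per-group membership tests).
import Mathlib
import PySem

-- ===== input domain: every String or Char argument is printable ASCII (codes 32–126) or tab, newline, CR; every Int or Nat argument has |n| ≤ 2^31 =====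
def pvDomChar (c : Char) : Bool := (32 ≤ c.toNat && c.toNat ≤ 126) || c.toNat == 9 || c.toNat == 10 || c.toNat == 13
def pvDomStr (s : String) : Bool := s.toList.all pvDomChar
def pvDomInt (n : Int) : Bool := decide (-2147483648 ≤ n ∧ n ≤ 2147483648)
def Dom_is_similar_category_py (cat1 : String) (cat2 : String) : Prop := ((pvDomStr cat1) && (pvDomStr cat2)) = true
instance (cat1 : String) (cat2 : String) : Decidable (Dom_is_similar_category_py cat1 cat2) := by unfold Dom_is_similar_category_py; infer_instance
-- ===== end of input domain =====

-- B replaces A's scan over a list of two-element sets by one precomputed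
-- category→group-id dict and a single pair of lookups (idiomatic; no loop).

-- ===== PORT A =====
-- the literal list of similar groups, each a Python set
def simGroups : List (PySem.Set String) :=
  [ PySem.Set.ofList ["outerwear", "seasonal"],
    PySem.Set.ofList ["formal", "professional"],
    PySem.Set.ofList ["casual", "everyday"],
    PySem.Set.ofList ["children", "kids"],
    PySem.Set.ofList ["household", "linens"] ]

-- the 'for group in similar_groups' loop with its early return
def simLoop (cat1 cat2 : String) : List (PySem.Set String) → Bool
  | [] => false
  | g :: rest => if g.contains cat1 && g.contains cat2 then true else simLoop cat1 cat2 rest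

def is_similar_category_py (cat1 : String) (cat2 : String) : Bool :=
  simLoop cat1 cat2 simGroups

-- ===== PORT B =====
def groupId : PySem.Dict String Int :=
  PySem.Dict.ofList
    [ ("outerwear", 0), ("seasonal", 0),
      ("formal", 1), ("professional", 1),
      ("casual", 2), ("everyday", 2),
      ("children", 3), ("kids", 3),
      ("household", 4), ("linens", 4) ]

def is_similar_category_py_alt (cat1 : String) (cat2 : String) : Bool :=
  match groupId.get? cat1 with
  | none => false
  | some g => groupId.get? cat2 == some g

-- ===== PRECONDITION & SPEC =====
def Spec_is_similar_category_py (cat1 : String) (cat2 : String) (out : Bool) : Prop := out = is_similar_category_py_alt cat1 cat2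
instance (cat1 : String) (cat2 : String) (out : Bool) : Decidable (Spec_is_similar_category_py cat1 cat2 out) := by unfold Spec_is_similar_category_py; infer_instance

-- ===== CLAIM (what is proved, stated in full; the proofs are below) =====
def Claim_equal_is_similar_category_py : Prop := ∀ (cat1 : String) (cat2 : String), Dom_is_similar_category_py cat1 cat2 → Spec_is_similar_category_py cat1 cat2 (is_similar_category_py cat1 cat2)

-- ===== LEMMAS AND PROOFS =====

-- the ten known category names
def knownCats : List String :=
  ["outerwear", "seasonal", "formal", "professional", "casual",
   "everyday", "children", "kids", "household", "linens"]

theorem simGroups_eval : simGroups =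
    [["outerwear", "seasonal"], ["formal", "professional"], ["casual", "everyday"],
     ["children", "kids"], ["household", "linens"]] := by decide

theorem groupId_eval : groupId = PySem.Dict.mk
    [ ("outerwear", 0), ("seasonal", 0), ("formal", 1), ("professional", 1),
      ("casual", 2), ("everyday", 2), ("children", 3), ("kids", 3),
      ("household", 4), ("linens", 4) ] := by decide

theorem a_false_of_left_unknown (cat1 cat2 : String) (h : cat1 ∉ knownCats) :
    is_similar_category_py cat1 cat2 = false := by
  simp only [knownCats, List.mem_cons, List.not_mem_nil, or_false, not_or] at h
  obtain ⟨h1, h2, h3, h4, h5, h6, h7, h8, h9, h10⟩ := h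
  rw [is_similar_category_py, simGroups_eval]
  simp [simLoop, List.contains, List.elem,
        beq_eq_false_iff_ne.mpr h1, beq_eq_false_iff_ne.mpr h2, beq_eq_false_iff_ne.mpr h3,
        beq_eq_false_iff_ne.mpr h4, beq_eq_false_iff_ne.mpr h5, beq_eq_false_iff_ne.mpr h6,
        beq_eq_false_iff_ne.mpr h7, beq_eq_false_iff_ne.mpr h8, beq_eq_false_iff_ne.mpr h9,
        beq_eq_false_iff_ne.mpr h10]

theorem b_get_left_unknown (cat1 : String) (h : cat1 ∉ knownCats) :
    groupId.get? cat1 = none := by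
  simp only [knownCats, List.mem_cons, List.not_mem_nil, or_false, not_or] at h
  obtain ⟨h1, h2, h3, h4, h5, h6, h7, h8, h9, h10⟩ := h
  rw [groupId_eval]
  simp [PySem.Dict.get?, Ne.symm h1, Ne.symm h2, Ne.symm h3, Ne.symm h4,
        Ne.symm h5, Ne.symm h6, Ne.symm h7, Ne.symm h8, Ne.symm h9, Ne.symm h10]

theorem eq_of_right_unknown (cat1 cat2 : String) (h : cat2 ∉ knownCats) :
    is_similar_category_py cat1 cat2 = is_similar_category_py_alt cat1 cat2 := by
  have hget := b_get_left_unknown cat2 h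
  simp only [knownCats, List.mem_cons, List.not_mem_nil, or_false, not_or] at h
  obtain ⟨h1, h2, h3, h4, h5, h6, h7, h8, h9, h10⟩ := h
  rw [is_similar_category_py, simGroups_eval, is_similar_category_py_alt, hget]
  cases hg : groupId.get? cat1 <;>
    simp [simLoop, List.contains, List.elem,
        beq_eq_false_iff_ne.mpr h1, beq_eq_false_iff_ne.mpr h2, beq_eq_false_iff_ne.mpr h3,
        beq_eq_false_iff_ne.mpr h4, beq_eq_false_iff_ne.mpr h5, beq_eq_false_iff_ne.mpr h6,
        beq_eq_false_iff_ne.mpr h7, beq_eq_false_iff_ne.mpr h8, beq_eq_false_iff_ne.mpr h9,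
        beq_eq_false_iff_ne.mpr h10]

-- ===== VERDICT (by name: the statement is the Claim_ definition above) =====
theorem is_similar_category_py_spec : Claim_equal_is_similar_category_py := by
  intro cat1 cat2 _
  show is_similar_category_py cat1 cat2 = is_similar_category_py_alt cat1 cat2
  by_cases hc1 : cat1 ∈ knownCats
  · by_cases hc2 : cat2 ∈ knownCats
    · fin_cases hc1 <;> fin_cases hc2 <;> decide
    · exact eq_of_right_unknown cat1 cat2 hc2
  · rw [a_false_of_left_unknown cat1 cat2 hc1, is_similar_category_py_alt,
        b_get_left_unknown cat1 hc1]
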